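-- pv_equiv track=rewrite | github.com/ghostescript/ovaltinepy | ovaltine.py | base58_handler
-- ===== SOURCE A (Python) =====
-- def base58_handler(text, choice, **kwargs):
--     alphabet = '123456789ABCDEFGHJKLMNPQRSTUVWXYZabcdefghijkmnopqrstuvwxyz'
--     if choice == '1':
--         n = int.from_bytes(text.encode('utf-8'), 'big')
--         result = ''
--         while n > 0:
--             n, remainder = divmod(n, 58)
--             result = alphabet[remainder] + result
--         return result
--     elif choice == '2':
--         n = 0
--         for char in text:
--             n = n * 58 + alphabet.index(char)
--         return n.to_bytes((n.bit_length() + 7) // 8, 'big').decode('utf-8')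
-- ===== SOURCE B (Python) =====
-- def base58_handler(text, choice, **kwargs):
--     # Carry-propagation (Bitcoin-reference style) base conversion over digit lists,
--     # instead of A's one big Python integer.
--     alphabet = '123456789ABCDEFGHJKLMNPQRSTUVWXYZabcdefghijkmnopqrstuvwxyz'
--     if choice == '1':
--         digits = []  # little-endian base-58 digits
--         for byte in text.encode('utf-8'):
--             carry = byte
--             for j in range(len(digits)):
--                 carry += digits[j] * 256
--                 digits[j] = carry % 58
--                 carry //= 58
--             while carry:
--                 digits.append(carry % 58)
--                 carry //= 58
--         return ''.join(alphabet[d] for d in reversed(digits))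
--     elif choice == '2':
--         digits = []  # little-endian base-256 digits
--         for char in text:
--             carry = alphabet.index(char)
--             for j in range(len(digits)):
--                 carry += digits[j] * 58
--                 digits[j] = carry % 256
--                 carry //= 256
--             while carry:
--                 digits.append(carry % 256)
--                 carry //= 256
--         return bytes(reversed(digits)).decode('utf-8')
-- ===== Notes on version B (the rewrite author's own statement) =====
-- stated objective: alternative
-- what changed: Both branches are re-implemented with the Bitcoin-reference carry-propagation base conversion over a little-endian digit list (per-byte/per-char inner carry loop) instead of A's single Python bignum built with int.from_bytes/divmod/to_bytes.
import Mathlib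
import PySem

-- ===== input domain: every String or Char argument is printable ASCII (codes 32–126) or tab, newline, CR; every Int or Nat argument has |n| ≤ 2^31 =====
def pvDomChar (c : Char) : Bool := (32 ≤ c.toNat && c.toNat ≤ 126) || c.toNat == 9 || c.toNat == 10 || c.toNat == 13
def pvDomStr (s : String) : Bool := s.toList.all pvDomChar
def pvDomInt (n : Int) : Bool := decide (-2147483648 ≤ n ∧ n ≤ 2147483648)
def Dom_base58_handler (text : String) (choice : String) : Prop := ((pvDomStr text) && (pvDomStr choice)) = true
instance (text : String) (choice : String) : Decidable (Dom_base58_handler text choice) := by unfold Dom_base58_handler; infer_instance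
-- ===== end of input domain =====

-- B replaces A's Python-bignum base conversion by carry propagation over little-endian digit
-- lists (Bitcoin-reference style); same values, no speed claim (objective: alternative).


-- Shared helpers (both Pythons use the same alphabet, alphabet.index, UTF-8 codec).
-- '123456789ABCDEFGHJKLMNPQRSTUVWXYZabcdefghijkmnopqrstuvwxyz' as an explicit char list
def alphaChars : List Char :=
  ['1', '2', '3', '4', '5', '6', '7', '8', '9', 'A', 'B', 'C', 'D', 'E', 'F', 'G', 'H', 'J', 'K', 'L', 'M', 'N', 'P', 'Q', 'R', 'S', 'T', 'U', 'V', 'W', 'X', 'Y', 'Z', 'a', 'b', 'c', 'd', 'e', 'f', 'g', 'h', 'i', 'j', 'k', 'm', 'n', 'o', 'p', 'q', 'r', 's', 't', 'u', 'v', 'w', 'x', 'y', 'z']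

def alphaChar (i : Nat) : Char := alphaChars.getD i ' '

-- text.encode('utf-8') as a byte list: exact on Dom (ASCII-only strings encode to their char codes).
def asciiBytes (s : String) : List Nat := s.toList.map Char.toNat

def isCont (b : Nat) : Bool := 0x80 ≤ b && b ≤ 0xBF

-- bytes(...).decode('utf-8'), hand-ported step for step (strict CPython UTF-8: C0/C1/overlong/
-- surrogate/>U+10FFFF rejected); none = UnicodeDecodeError.
def utf8DecGo : Nat → List Nat → Option (List Char)
  | _, [] => some []
  | 0, _ => none   -- fuel ≥ list length on every call below; never reached
  | fuel + 1, b0 :: r0 =>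
    if b0 < 0x80 then (utf8DecGo fuel r0).map (Char.ofNat b0 :: ·)
    else if b0 < 0xC2 then none
    else if b0 ≤ 0xDF then
      match r0 with
      | b1 :: r1 =>
        if isCont b1 then (utf8DecGo fuel r1).map (Char.ofNat ((b0 - 0xC0) * 64 + (b1 - 0x80)) :: ·)
        else none
      | [] => none
    else if b0 ≤ 0xEF then
      match r0 with
      | b1 :: b2 :: r2 =>
        if (if b0 = 0xE0 then decide (0xA0 ≤ b1 ∧ b1 ≤ 0xBF)
            else if b0 = 0xED then decide (0x80 ≤ b1 ∧ b1 ≤ 0x9F)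
            else isCont b1) && isCont b2 then
          (utf8DecGo fuel r2).map (Char.ofNat ((b0 - 0xE0) * 4096 + (b1 - 0x80) * 64 + (b2 - 0x80)) :: ·)
        else none
      | _ => none
    else if b0 ≤ 0xF4 then
      match r0 with
      | b1 :: b2 :: b3 :: r3 =>
        if (if b0 = 0xF0 then decide (0x90 ≤ b1 ∧ b1 ≤ 0xBF)
            else if b0 = 0xF4 then decide (0x80 ≤ b1 ∧ b1 ≤ 0x8F)
            else isCont b1) && isCont b2 && isCont b3 then
          (utf8DecGo fuel r3).map
            (Char.ofNat ((b0 - 0xF0) * 262144 + (b1 - 0x80) * 4096 + (b2 - 0x80) * 64 + (b3 - 0x80)) :: ·)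
        else none
      | _ => none
    else none

def utf8Dec? (l : List Nat) : Option (List Char) := utf8DecGo l.length l

-- ===== PORT A =====
-- while n > 0: n, r = divmod(n, 58); result = alphabet[r] + result
def aEncLoop (n : Nat) (res : List Char) : List Char :=
  if h : 0 < n then aEncLoop (n / 58) (alphaChar (n % 58) :: res) else res
  termination_by n
  decreasing_by exact Nat.div_lt_self h (by norm_num)

-- n.bit_length()
def aBitLen (n : Nat) : Nat :=
  if h : n = 0 then 0 else 1 + aBitLen (n / 2)
  termination_by n
  decreasing_by exact Nat.div_lt_self (Nat.pos_of_ne_zero h) (by norm_num)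

-- n.to_bytes(len, 'big')  (n < 256^len on every use here)
def aToBytes (n : Nat) : Nat → List Nat
  | 0 => []
  | len + 1 => aToBytes (n / 256) len ++ [n % 256]

-- for char in text: n = n*58 + alphabet.index(char)   (none = ValueError)
def aDecNum : List Char → Nat → Option Nat
  | [], n => some n
  | c :: r, n =>
    match List.idxOf? c alphaChars with
    | some i => aDecNum r (n * 58 + i)
    | none => none

def base58_handler (text : String) (choice : String) : Option String :=
  if choice = "1" then
    let n := (asciiBytes text).foldl (fun a b => 256 * a + b) 0
    some (String.mk (aEncLoop n []))
  else if choice = "2" then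
    match aDecNum text.toList 0 with
    | none => none   -- ValueError (outside Pre_)
    | some n => (utf8Dec? (aToBytes n ((aBitLen n + 7) / 8))).map String.mk
  else none

-- ===== PORT B =====
-- while carry: digits.append(carry % K); carry //= K   (the K < 2 test is only a totality guard)
def pvDigsFuel : Nat → Nat → Nat → List Nat
  | 0, _, _ => []
  | fuel + 1, K, n => if K < 2 ∨ n = 0 then [] else n % K :: pvDigsFuel fuel K (n / K)

def pvDigs (K : Nat) (n : Nat) : List Nat := pvDigsFuel n K n

-- for j in range(len(digits)): carry += digits[j]*M; digits[j] = carry % K; carry //= K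
def pvInner (K M : Nat) (carry : Nat) : List Nat → List Nat × Nat
  | [] => ([], carry)
  | d :: r =>
    let c := carry + d * M
    let p := pvInner K M (c / K) r
    (c % K :: p.1, p.2)

-- one byte/char of the carry-propagation loop body
def pvStep (K M : Nat) (b : Nat) (ds : List Nat) : List Nat :=
  let p := pvInner K M b ds
  p.1 ++ pvDigs K p.2

-- decode loop of B: digit list updated per char (none = ValueError)
def bDecLoop : List Char → List Nat → Option (List Nat)
  | [], ds => some ds
  | c :: r, ds =>
    match List.idxOf? c alphaChars with
    | some i => bDecLoop r (pvStep 256 58 i ds)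
    | none => none

def base58_handler_alt (text : String) (choice : String) : Option String :=
  if choice = "1" then
    let digits := (asciiBytes text).foldl (fun ds b => pvStep 58 256 b ds) []
    some (String.mk (digits.reverse.map alphaChar))
  else if choice = "2" then
    match bDecLoop text.toList [] with
    | none => none   -- ValueError (outside Pre_)
    | some ds => (utf8Dec? ds.reverse).map String.mk
  else none

-- ===== PRECONDITION & SPEC =====
-- spec-side Horner value of a base-58 string (total; guarded by the membership clause)
def pvVal58 (cs : List Char) : Nat := cs.foldl (fun n c => n * 58 + alphaChars.idxOf c) 0

-- Pre_ excludes exactly the choice = "2" inputs on which A raises: ValueError (a character not in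
-- the base-58 alphabet) or UnicodeDecodeError (the decoded bytes are not valid UTF-8).
-- well-formed-UTF-8 shape check for Pre_ (state machine: k pending continuation bytes, the next
-- one constrained to [lo, hi]); a shape condition on the byte string, independent of the decoder
def utf8ValidAux : List Nat → Nat → Nat → Nat → Bool
  | [], k, _, _ => decide (k = 0)
  | b :: r, k + 1, lo, hi => decide (lo ≤ b ∧ b ≤ hi) && utf8ValidAux r k 0x80 0xBF
  | b :: r, 0, _, _ =>
    if b < 0x80 then utf8ValidAux r 0 0 0
    else if b < 0xC2 then false
    else if b ≤ 0xDF then utf8ValidAux r 1 0x80 0xBF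
    else if b = 0xE0 then utf8ValidAux r 2 0xA0 0xBF
    else if b = 0xED then utf8ValidAux r 2 0x80 0x9F
    else if b ≤ 0xEF then utf8ValidAux r 2 0x80 0xBF
    else if b = 0xF0 then utf8ValidAux r 3 0x90 0xBF
    else if b ≤ 0xF3 then utf8ValidAux r 3 0x80 0xBF
    else if b = 0xF4 then utf8ValidAux r 3 0x80 0x8F
    else false

def utf8Valid (bs : List Nat) : Bool := utf8ValidAux bs 0 0 0

def Pre_base58_handler (text : String) (choice : String) : Prop :=
  choice = "2" →
    (text.toList.all (fun c => alphaChars.contains c)) = true ∧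
    utf8Valid (Nat.digits 256 (pvVal58 text.toList)).reverse = true
instance (text : String) (choice : String) : Decidable (Pre_base58_handler text choice) := by
  unfold Pre_base58_handler; infer_instance

def pvWitness_base58_handler : String × String := ("", "2")

def Spec_base58_handler (text : String) (choice : String) (out : Option String) : Prop :=
  out = base58_handler_alt text choice
instance (text : String) (choice : String) (out : Option String) :
    Decidable (Spec_base58_handler text choice out) := by
  unfold Spec_base58_handler; infer_instance

-- ===== CLAIM (what is proved, stated in full; the proofs are below) =====
def Claim_equal_base58_handler : Prop :=
  ∀ (text : String) (choice : String), Dom_base58_handler text choice →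
    Pre_base58_handler text choice →
    Spec_base58_handler text choice (base58_handler text choice)

-- ===== LEMMAS AND PROOFS =====
theorem pvDigsFuel_adequate : ∀ f1 : Nat, ∀ f2 n K : Nat, n ≤ f1 → n ≤ f2 →
    pvDigsFuel f1 K n = pvDigsFuel f2 K n := by
  intro f1
  induction f1 with
  | zero =>
    intro f2 n K h1 _
    have : n = 0 := by omega
    subst this
    cases f2 <;> simp [pvDigsFuel]
  | succ f ih =>
    intro f2 n K h1 h2
    by_cases hn : n = 0
    · subst hn
      cases f2 <;> simp [pvDigsFuel]
    · obtain ⟨f2', rfl⟩ : ∃ m, f2 = m + 1 := ⟨f2 - 1, by omega⟩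
      simp only [pvDigsFuel]
      by_cases hK : K < 2
      · simp [hK]
      · have hdiv : n / K < n := Nat.div_lt_self (Nat.pos_of_ne_zero hn) (by omega)
        rw [ih f2' (n / K) K (by omega) (by omega)]

theorem pvDigs_nil (K : Nat) : pvDigs K 0 = [] := by rfl

theorem pvDigs_cons (K n : Nat) (hK : 2 ≤ K) (hn : n ≠ 0) :
    pvDigs K n = n % K :: pvDigs K (n / K) := by
  obtain ⟨m, rfl⟩ : ∃ m, n = m + 1 := ⟨n - 1, by omega⟩
  show pvDigsFuel (m + 1) K (m + 1) = _
  simp only [pvDigsFuel, if_neg (by omega : ¬ (K < 2 ∨ m + 1 = 0))]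
  congr 1
  exact pvDigsFuel_adequate m _ _ K
    (by have := Nat.div_lt_self (by omega : 0 < m + 1) (by omega : 1 < K); omega)
    (le_refl _)

def pvVal (K : Nat) : List Nat → Nat
  | [] => 0
  | d :: r => d + K * pvVal K r

theorem pvVal_append (K : Nat) (xs ys : List Nat) :
    pvVal K (xs ++ ys) = pvVal K xs + K ^ xs.length * pvVal K ys := by
  induction xs with
  | nil => simp [pvVal]
  | cons d r ih => simp [pvVal, ih, pow_succ]; ring

theorem pvInner_val (K M : Nat) (ds : List Nat) (hK : 2 ≤ K) : ∀ carry,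
    pvVal K (pvInner K M carry ds).1 + K ^ ds.length * (pvInner K M carry ds).2
      = carry + M * pvVal K ds := by
  induction ds with
  | nil => intro carry; simp [pvInner, pvVal]
  | cons d r ih =>
    intro carry
    simp only [pvInner, pvVal, List.length_cons]
    have h := ih ((carry + d * M) / K)
    have hdm := Nat.div_add_mod (carry + d * M) K
    rw [pow_succ]
    nlinarith [h, hdm]

theorem pvInner_len (K M : Nat) (ds : List Nat) : ∀ carry,
    (pvInner K M carry ds).1.length = ds.length := by
  induction ds with
  | nil => intro; simp [pvInner]
  | cons d r ih => intro carry; simp [pvInner, ih]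

theorem pvInner_lt (K M : Nat) (ds : List Nat) (hK : 2 ≤ K) : ∀ carry,
    ∀ d ∈ (pvInner K M carry ds).1, d < K := by
  induction ds with
  | nil => intro carry d hd; simp [pvInner] at hd
  | cons d r ih =>
    intro carry e he
    simp only [pvInner, List.mem_cons] at he
    rcases he with h | h
    · rw [h]; exact Nat.mod_lt _ (by omega)
    · exact ih _ e h

theorem pvDigs_val (K : Nat) (hK : 2 ≤ K) : ∀ n, pvVal K (pvDigs K n) = n := by
  intro n
  induction n using Nat.strong_induction_on with
  | _ n ih =>
    by_cases hn : n = 0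
    · simp [hn, pvDigs_nil, pvVal]
    · rw [pvDigs_cons K n hK hn]
      simp only [pvVal]
      rw [ih (n / K) (Nat.div_lt_self (Nat.pos_of_ne_zero hn) (by omega))]
      exact Nat.mod_add_div n K

theorem pvDigs_lt (K : Nat) (hK : 2 ≤ K) : ∀ n, ∀ d ∈ pvDigs K n, d < K := by
  intro n
  induction n using Nat.strong_induction_on with
  | _ n ih =>
    intro d hd
    by_cases hn : n = 0
    · simp [hn, pvDigs_nil] at hd
    · rw [pvDigs_cons K n hK hn] at hd
      rcases List.mem_cons.mp hd with h | h
      · rw [h]; exact Nat.mod_lt _ (by omega)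
      · exact ih (n / K) (Nat.div_lt_self (Nat.pos_of_ne_zero hn) (by omega)) d h

theorem pvDigs_last (K : Nat) (hK : 2 ≤ K) : ∀ n, (pvDigs K n).getLast? ≠ some 0 := by
  intro n
  induction n using Nat.strong_induction_on with
  | _ n ih =>
    by_cases hn : n = 0
    · simp [hn, pvDigs_nil]
    · rw [pvDigs_cons K n hK hn]
      rcases he : pvDigs K (n / K) with _ | ⟨d, r⟩
      · have hq : n / K = 0 := by
          by_contra hq
          rw [pvDigs_cons K _ hK hq] at he
          simp at he
        have hlt : n < K := by
          rcases Nat.div_eq_zero_iff.mp hq with h | h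
          · omega
          · exact h
        simp [Nat.mod_eq_of_lt hlt]
        omega
      · have := ih (n / K) (Nat.div_lt_self (Nat.pos_of_ne_zero hn) (by omega))
        rw [he] at this
        simpa [List.getLast?_cons_cons] using this

theorem pvDigs_unique (K : Nat) (hK : 2 ≤ K) : ∀ ds : List Nat, (∀ d ∈ ds, d < K) →
    ds.getLast? ≠ some 0 → pvDigs K (pvVal K ds) = ds := by
  intro ds
  induction ds with
  | nil => intro _ _; simp [pvVal, pvDigs_nil]
  | cons d r ih =>
    intro hlt hlast
    have hd : d < K := hlt d (by simp)
    have hv : pvVal K (d :: r) = d + K * pvVal K r := rfl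
    by_cases hr : r = []
    · subst hr
      have hd0 : d ≠ 0 := by intro h; apply hlast; simp [h]
      rw [pvDigs_cons K _ hK (by simp [pvVal]; omega)]
      simp [pvVal, Nat.mod_eq_of_lt hd, Nat.div_eq_of_lt hd, pvDigs_nil]
    · have hrlast : r.getLast? ≠ some 0 := by
        intro h; apply hlast
        rcases r with _ | ⟨e, s⟩
        · exact absurd rfl hr
        · rw [List.getLast?_cons_cons]; exact h
      have hrlt : ∀ x ∈ r, x < K := fun x hx => hlt x (by simp [hx])
      have hrec := ih hrlt hrlast
      have hrpos : pvVal K r ≠ 0 := by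
        intro h0
        rw [h0, pvDigs_nil] at hrec
        exact hr hrec.symm
      have hne : d + K * pvVal K r ≠ 0 := by
        have : 0 < pvVal K r := Nat.pos_of_ne_zero hrpos
        nlinarith
      rw [hv, pvDigs_cons K _ hK hne]
      have hmod : (d + K * pvVal K r) % K = d := by
        rw [Nat.add_mul_mod_self_left]; exact Nat.mod_eq_of_lt hd
      have hdiv : (d + K * pvVal K r) / K = pvVal K r := by
        rw [Nat.add_mul_div_left _ _ (by omega), Nat.div_eq_of_lt hd]; omega
      rw [hmod, hdiv, hrec]

theorem pvDigs_lower (K : Nat) (hK : 2 ≤ K) : ∀ n, 0 < n →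
    K ^ ((pvDigs K n).length - 1) ≤ n := by
  intro n
  induction n using Nat.strong_induction_on with
  | _ n ih =>
    intro hn
    rw [pvDigs_cons K n hK (by omega)]
    simp only [List.length_cons]
    by_cases hq : n / K = 0
    · simp [hq, pvDigs_nil]; omega
    · have hrec := ih (n / K) (Nat.div_lt_self hn (by omega)) (Nat.pos_of_ne_zero hq)
      have hlen : 1 ≤ (pvDigs K (n / K)).length := by
        rw [pvDigs_cons K _ hK hq]; simp
      have h1 : K ^ ((pvDigs K (n / K)).length - 1 + 1) ≤ K * (n / K) := by
        rw [pow_succ, Nat.mul_comm _ K]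
        exact Nat.mul_le_mul_left _ hrec
      have h2 : K * (n / K) ≤ n := Nat.mul_div_le n K |>.trans_eq' (by rw [Nat.mul_comm])
      calc K ^ ((pvDigs K (n / K)).length + 1 - 1)
          = K ^ ((pvDigs K (n / K)).length - 1 + 1) := by congr 1; omega
        _ ≤ K * (n / K) := h1
        _ ≤ n := h2

theorem norm_of_big (K : Nat) (hK : 2 ≤ K) : ∀ ds : List Nat,
    (∀ d ∈ ds, d < K) → K ^ (ds.length - 1) ≤ pvVal K ds → ds.getLast? ≠ some 0 ∨ ds = [] := by
  intro ds
  induction ds with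
  | nil => intro _ _; right; rfl
  | cons d r ih =>
    intro hlt hbig
    left
    rcases hr : r with _ | ⟨e, s⟩
    · subst hr
      simp only [List.getLast?_singleton, ne_eq, Option.some.injEq]
      simp [pvVal] at hbig
      omega
    · subst hr
      rw [List.getLast?_cons_cons]
      have hrlt : ∀ x ∈ e :: s, x < K := fun x hx => hlt x (by simp [hx])
      have hd : d < K := hlt d (by simp)
      have hbig' : K ^ ((e :: s).length - 1) ≤ pvVal K (e :: s) := by
        simp only [List.length_cons, Nat.add_sub_cancel] at hbig ⊢
        have hpow : K ^ (s.length + 1) = K * K ^ s.length := by rw [pow_succ]; ring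
        have hb2 : K * K ^ s.length ≤ d + K * pvVal K (e :: s) := by
          rw [← hpow]; exact hbig
        by_contra hcon
        have h1 : pvVal K (e :: s) + 1 ≤ K ^ s.length :=
          Nat.succ_le_of_lt (Nat.lt_of_not_le hcon)
        have h3 := Nat.mul_le_mul_left K h1
        linarith
      rcases ih hrlt hbig' with h | h
      · exact h
      · simp at h

theorem pvDigs_ne_nil (K n : Nat) (hK : 2 ≤ K) (hn : n ≠ 0) : pvDigs K n ≠ [] := by
  rw [pvDigs_cons K n hK hn]; simp

theorem pvStep_digs (K M : Nat) (hK : 2 ≤ K) (hM : 1 ≤ M) (b m : Nat) :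
    pvStep K M b (pvDigs K m) = pvDigs K (m * M + b) := by
  by_cases hm : m = 0
  · subst hm
    simp only [pvDigs_nil, pvStep, pvInner, Nat.zero_mul, Nat.zero_add, List.nil_append]
  · set ds := pvDigs K m with hds
    set p := pvInner K M b ds with hp
    have hlen : p.1.length = ds.length := pvInner_len K M ds b
    have hival := pvInner_val K M ds hK b
    have hdsval : pvVal K ds = m := pvDigs_val K hK m
    have hval : pvVal K (p.1 ++ pvDigs K p.2) = m * M + b := by
      rw [pvVal_append, pvDigs_val K hK, hlen]
      rw [hdsval] at hival
      linarith [hival]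
    have hlt : ∀ d ∈ p.1 ++ pvDigs K p.2, d < K := by
      intro d hd
      rcases List.mem_append.mp hd with h | h
      · exact pvInner_lt K M ds hK b d h
      · exact pvDigs_lt K hK p.2 d h
    have hlast : (p.1 ++ pvDigs K p.2).getLast? ≠ some 0 := by
      by_cases hc : p.2 = 0
      · rw [hc, pvDigs_nil, List.append_nil]
        have hdsne : ds ≠ [] := pvDigs_ne_nil K m hK hm
        have hL : 0 < ds.length := List.length_pos_iff.mpr hdsne
        have hlow : K ^ (ds.length - 1) ≤ m := by
          rw [hds]; exact pvDigs_lower K hK m (Nat.pos_of_ne_zero hm)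
        have hvp : pvVal K p.1 = m * M + b := by
          have := hval
          rw [hc, pvDigs_nil, List.append_nil] at this
          exact this
        have hbig : K ^ (p.1.length - 1) ≤ pvVal K p.1 := by
          rw [hvp, hlen]
          calc K ^ (ds.length - 1) ≤ m := hlow
            _ ≤ m * M := Nat.le_mul_of_pos_right _ (by omega)
            _ ≤ m * M + b := Nat.le_add_right _ _
        rcases norm_of_big K hK p.1 (fun d hd => pvInner_lt K M ds hK b d hd) hbig with h | h
        · exact h
        · rw [h] at hlen
          simp at hlen
          exact absurd hlen.symm (List.length_pos_iff.mpr hdsne).ne'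
      · rw [List.getLast?_append_of_ne_nil _ (pvDigs_ne_nil K p.2 hK hc)]
        exact pvDigs_last K hK p.2
    have := pvDigs_unique K hK (p.1 ++ pvDigs K p.2) hlt hlast
    rw [hval] at this
    rw [pvStep, ← hp, ← this]

theorem bEnc_fold (bs : List Nat) : ∀ m,
    bs.foldl (fun ds b => pvStep 58 256 b ds) (pvDigs 58 m)
      = pvDigs 58 (bs.foldl (fun a b => 256 * a + b) m) := by
  induction bs with
  | nil => intro m; rfl
  | cons b r ih =>
    intro m
    simp only [List.foldl_cons]
    rw [pvStep_digs 58 256 (by norm_num) (by norm_num)]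
    rw [show m * 256 + b = 256 * m + b by ring]
    exact ih _

theorem aEncLoop_eq : ∀ n res, aEncLoop n res = ((pvDigs 58 n).map alphaChar).reverse ++ res := by
  intro n
  induction n using Nat.strong_induction_on with
  | _ n ih =>
    intro res
    rw [aEncLoop]
    by_cases h : 0 < n
    · rw [dif_pos h, pvDigs_cons 58 n (by norm_num) (by omega)]
      rw [ih (n / 58) (Nat.div_lt_self h (by norm_num))]
      simp
    · have h0 : n = 0 := by omega
      rw [dif_neg h, h0, pvDigs_nil]
      simp

theorem bDec_fold (cs : List Char) : ∀ m,
    bDecLoop cs (pvDigs 256 m) = (aDecNum cs m).map (pvDigs 256) := by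
  induction cs with
  | nil => intro m; rfl
  | cons c r ih =>
    intro m
    simp only [bDecLoop, aDecNum]
    rcases List.idxOf? c alphaChars with _ | i
    · rfl
    · simp only
      rw [pvStep_digs 256 58 (by norm_num) (by norm_num)]
      rw [show m * 58 + i = m * 58 + i by rfl]
      exact ih _

theorem aBitLen_bounds : ∀ n, 0 < n → 2 ^ (aBitLen n - 1) ≤ n ∧ n < 2 ^ aBitLen n := by
  intro n
  induction n using Nat.strong_induction_on with
  | _ n ih =>
    intro hn
    rw [aBitLen, dif_neg (by omega : ¬ n = 0)]
    by_cases hq : n / 2 = 0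
    · have : n = 1 := by omega
      subst this
      rw [aBitLen]; simp
    · have := ih (n / 2) (Nat.div_lt_self hn (by norm_num)) (Nat.pos_of_ne_zero hq)
      obtain ⟨h1, h2⟩ := this
      have hb1 : 1 ≤ aBitLen (n / 2) := by
        rw [aBitLen, dif_neg hq]; omega
      constructor
      · rw [show 1 + aBitLen (n / 2) - 1 = aBitLen (n / 2) from by omega]
        obtain ⟨j, hj⟩ : ∃ j, aBitLen (n / 2) = j + 1 := ⟨aBitLen (n / 2) - 1, by omega⟩
        have h1' : 2 ^ j ≤ n / 2 := by
          rw [hj] at h1; simpa using h1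
        rw [hj, pow_succ]
        omega
      · rw [show 2 ^ (1 + aBitLen (n / 2)) = 2 * 2 ^ aBitLen (n / 2) from by
          rw [Nat.add_comm, pow_succ]; ring]
        omega

theorem aToBytes_eq : ∀ len n, (len = 0 → n = 0) → (0 < len → 256 ^ (len - 1) ≤ n) →
    n < 256 ^ len → aToBytes n len = (pvDigs 256 n).reverse := by
  intro len
  induction len with
  | zero =>
    intro n h _ _
    have : n = 0 := h rfl
    subst this
    rw [pvDigs_nil]
    simp [aToBytes]
  | succ L ihL =>
    intro n _ hlo hup
    have hlo' := hlo (by omega)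
    have hn : 0 < n := by
      have : 1 ≤ 256 ^ (L + 1 - 1) := Nat.one_le_pow _ _ (by norm_num)
      omega
    simp only [aToBytes]
    rw [pvDigs_cons 256 n (by norm_num) (by omega)]
    simp only [List.reverse_cons]
    congr 1
    apply ihL
    · intro hL; subst hL
      simp at hlo'
      exact Nat.div_eq_of_lt (by simpa using hup)
    · intro hL
      have : 256 ^ (L - 1 + 1) ≤ n := by
        calc 256 ^ (L - 1 + 1) = 256 ^ (L + 1 - 1) := by congr 1; omega
          _ ≤ n := hlo'
      rw [pow_succ] at this
      calc 256 ^ (L - 1) ≤ n / 256 := Nat.le_div_iff_mul_le (by norm_num) |>.mpr this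
        _ = n / 256 := rfl
    · have : n < 256 ^ L * 256 := by
        rw [← pow_succ]; simpa using hup
      exact Nat.div_lt_iff_lt_mul (by norm_num) |>.mpr this

theorem aToBytes_digs (n : Nat) :
    aToBytes n ((aBitLen n + 7) / 8) = (pvDigs 256 n).reverse := by
  by_cases hn : n = 0
  · subst hn
    have : aBitLen 0 = 0 := by rw [aBitLen]; simp
    rw [this, pvDigs_nil]
    simp [aToBytes]
  · have hb := aBitLen_bounds n (Nat.pos_of_ne_zero hn)
    obtain ⟨h1, h2⟩ := hb
    have hk1 : 1 ≤ aBitLen n := by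
      by_contra h
      have : aBitLen n = 0 := by omega
      rw [this] at h2; simp at h2; omega
    set k := aBitLen n with hk
    set L := (k + 7) / 8 with hL
    have hL1 : 1 ≤ L := by
      rw [hL]; omega
    apply aToBytes_eq
    · omega
    · intro _
      have hexp : 8 * (L - 1) ≤ k - 1 := by omega
      calc 256 ^ (L - 1) = 2 ^ (8 * (L - 1)) := by
            rw [Nat.pow_mul]
        _ ≤ 2 ^ (k - 1) := Nat.pow_le_pow_right (by norm_num) hexp
        _ ≤ n := h1
    · have hexp : k ≤ 8 * L := by omega
      calc n < 2 ^ k := h2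
        _ ≤ 2 ^ (8 * L) := Nat.pow_le_pow_right (by norm_num) hexp
        _ = 256 ^ L := by rw [Nat.pow_mul]

-- ===== VERDICT (by name: the statement is the Claim_ definition above) =====
theorem base58_handler_spec : Claim_equal_base58_handler := by
  intro text choice _ _
  unfold Spec_base58_handler base58_handler base58_handler_alt
  by_cases h1 : choice = "1"
  · subst h1
    rw [if_pos rfl, if_pos rfl]
    have hfold := bEnc_fold (asciiBytes text) 0
    rw [pvDigs_nil] at hfold
    simp only [hfold, aEncLoop_eq, List.map_reverse, List.append_nil]
  · by_cases h2 : choice = "2"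
    · subst h2
      rw [if_neg h1, if_neg h1, if_pos rfl, if_pos rfl]
      have hfold := bDec_fold text.toList 0
      rw [pvDigs_nil] at hfold
      rw [hfold]
      rcases hd : aDecNum text.toList 0 with _ | n
      · simp
      · simp only [Option.map_some]
        rw [aToBytes_digs]
    · rw [if_neg h1, if_neg h1, if_neg h2, if_neg h2]
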